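-- pv_equiv track=rewrite | github.com/wzygxr/shuati | class170_SqrtDecomposition/Code37_HDU4352_Python.py | optimized_solver
-- ===== SOURCE A (Python) =====
-- from functools import lru_cache
--
-- def optimized_solver(l, r, k):
--     """
--     使用lru_cache优化的数位DP求解器
--     注意：在Python中，lru_cache对于递归函数更高效
--     """
--
--     def get_new_status(status, d):
--         tmp = status
--         for i in range(d, 10):
--             if tmp & (1 << i):
--                 tmp ^= (1 << i)
--                 break
--         tmp |= (1 << d)
--         return tmp
--
--     def get_lis_length(status):
--         return bin(status).count('1')
--
--     def calculate(x):
--         if x < 0: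
--             return 0
--
--         # 转换为数字数组
--         digits = []
--         if x == 0:
--             digits = [0]
--         else:
--             tmp = x
--             while tmp > 0:
--                 digits.append(tmp % 10)
--                 tmp //= 10
--             digits.reverse()
--
--         n = len(digits)
--
--         @lru_cache(maxsize=None)
--         def dfs(pos, status, leading_zero, limit):
--             if pos == n:
--                 if leading_zero:
--                     return 1 if k == 0 else 0
--                 return 1 if get_lis_length(status) == k else 0
--
--             res = 0
--             max_digit = digits[pos] if limit else 9
--
--             if leading_zero:
--                 # 选择继续前导零
--                 res += dfs(pos + 1, 0, True, limit and (0 == max_digit))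
--                 # 选择非零数字
--                 for d in range(1, max_digit + 1):
--                     new_status = get_new_status(0, d)
--                     res += dfs(pos + 1, new_status, False, limit and (d == max_digit))
--             else:
--                 # 正常情况
--                 for d in range(0, max_digit + 1):
--                     new_status = get_new_status(status, d)
--                     res += dfs(pos + 1, new_status, False, limit and (d == max_digit))
--
--             return res
--
--         return dfs(0, 0, True, True)
--
--     return calculate(r) - calculate(l - 1)
-- ===== SOURCE B (Python) =====
-- def optimized_solver(l, r, k):
--     # Iterative table-based digit DP: build per-level completion-count tables
--     # bottom-up as plain lists (no recursion, no memoization), then scan the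
--     # tight prefix of the digits adding table entries for smaller digits.
--
--     def step(status, d):
--         # same transition as get_new_status, via bit tricks: clear the lowest
--         # set bit at index >= d (if any, within the 10-bit window), then set bit d
--         t = (status >> d) << d
--         if t:
--             status ^= t & (t ^ (t - 1))
--         return status | (1 << d)
--
--     def to_digits(n):
--         return [n] if n < 10 else to_digits(n // 10) + [n % 10]
--
--     def count(x):
--         if x < 0:
--             return 0
--         ds = to_digits(x)
--         n = len(ds)
--         free = [1 if bin(s).count('1') == k else 0 for s in range(1024)]
--         lzf = 1 if k == 0 else 0
--         tables = [(free, lzf)]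
--         for _ in range(n - 1):
--             prev, plz = tables[-1]
--             free = [sum(prev[step(s, d)] for d in range(10)) for s in range(1024)]
--             lzf = plz + sum(prev[step(0, d)] for d in range(1, 10))
--             tables.append((free, lzf))
--         total, status, lz = 0, 0, True
--         for dig, (free, lzf) in zip(ds, reversed(tables)):
--             base = 0 if lz else status
--             for d in range(dig):
--                 total += lzf if (lz and d == 0) else free[step(base, d)]
--             if not (lz and dig == 0):
--                 status = step(base, dig)
--                 lz = False
--         total += (1 if k == 0 else 0) if lz else (1 if bin(status).count('1') == k else 0)
--         return total
--
--     return count(r) - count(l - 1)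
-- ===== Notes on version B (the rewrite author's own statement) =====
-- stated objective: alternative
-- what changed: Replaced A's memoized recursive digit-dfs over (pos,status,leading_zero,limit) by an iterative bottom-up build of per-level completion-count tables (plain 1024-entry lists, no recursion or caching) followed by a single tight-prefix scan of the digits, with the bitmask transition rewritten via lowest-set-bit tricks.
import Mathlib
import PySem

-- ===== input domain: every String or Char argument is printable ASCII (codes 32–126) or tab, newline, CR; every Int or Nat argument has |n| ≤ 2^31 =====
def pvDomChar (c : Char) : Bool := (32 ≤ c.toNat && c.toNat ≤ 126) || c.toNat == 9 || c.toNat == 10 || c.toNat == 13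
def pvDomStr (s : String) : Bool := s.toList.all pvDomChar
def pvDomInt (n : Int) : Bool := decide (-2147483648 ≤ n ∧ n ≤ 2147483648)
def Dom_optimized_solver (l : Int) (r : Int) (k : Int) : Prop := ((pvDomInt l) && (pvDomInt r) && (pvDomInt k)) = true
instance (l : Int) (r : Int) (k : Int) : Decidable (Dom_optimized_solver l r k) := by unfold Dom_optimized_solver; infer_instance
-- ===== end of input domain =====

-- B replaces A's memoized limit/leading_zero digit-dfs by an iterative bottom-up table build
-- (per-level lists of completion counts, no recursion/memoization) plus a tight-prefix scan
-- (objective: alternative decomposition; return values agree on all inputs).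

-- ===== PORT A =====
-- get_new_status: loop 'for i in range(d,10): if tmp & (1<<i): tmp ^= 1<<i; break'
def pvGnsLoopA (tmp : Nat) : List Nat → Nat
  | [] => tmp
  | i :: rest => if tmp &&& (1 <<< i) ≠ 0 then tmp ^^^ (1 <<< i) else pvGnsLoopA tmp rest

def pvTransA (status d : Nat) : Nat := pvGnsLoopA status (List.range' d (10 - d)) ||| (1 <<< d)

-- get_lis_length: bin(status).count('1'); exact since status is a Nat here
def pvPcA (n : Nat) : Nat :=
  if n = 0 then 0 else n % 2 + pvPcA (n / 2)
decreasing_by exact Nat.div_lt_self (Nat.pos_of_ne_zero (by assumption)) one_lt_two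

-- the 'while tmp > 0: digits.append(tmp % 10); tmp //= 10' loop (least-significant first)
def pvDigitsLoopA (n : Nat) : List Nat :=
  if n = 0 then [] else n % 10 :: pvDigitsLoopA (n / 10)
decreasing_by exact Nat.div_lt_self (Nat.pos_of_ne_zero (by assumption)) (by norm_num)

-- dfs(pos, status, leading_zero, limit) with @lru_cache: the cache is keyed by
-- (remaining suffix length ≙ pos, status, leading_zero, limit) and threaded through the calls
mutual
def pvDfsAM (k : Int) (ds : List Nat) (status : Nat) (lz limit : Bool)
    (c : Std.HashMap (Nat × Nat × Bool × Bool) Int) :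
    Int × Std.HashMap (Nat × Nat × Bool × Bool) Int :=
  match c.get? (ds.length, status, lz, limit) with
  | some v => (v, c)
  | none =>
    match ds with
    | [] =>
      let v : Int := if lz then (if k = 0 then 1 else 0)
                     else (if (pvPcA status : Int) = k then 1 else 0)
      (v, c.insert (0, status, lz, limit) v)
    | dig :: rest =>
      let maxd := if limit then dig else 9
      if lz then
        let p0 := pvDfsAM k rest 0 true (limit && decide (0 = maxd)) c
        let p1 := pvDfsALoop k rest (fun d => pvTransA 0 d)
                    (fun d => limit && decide (d = maxd)) (List.range' 1 maxd) p0.1 p0.2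
        (p1.1, p1.2.insert (rest.length + 1, status, lz, limit) p1.1)
      else
        let p1 := pvDfsALoop k rest (fun d => pvTransA status d)
                    (fun d => limit && decide (d = maxd)) (List.range (maxd + 1)) 0 c
        (p1.1, p1.2.insert (rest.length + 1, status, lz, limit) p1.1)
termination_by (ds.length + 1, 0)

-- the 'for d in range(...): res += dfs(...)' loops
def pvDfsALoop (k : Int) (rest : List Nat) (f : Nat → Nat) (g : Nat → Bool) (dl : List Nat)
    (acc : Int) (c : Std.HashMap (Nat × Nat × Bool × Bool) Int) :
    Int × Std.HashMap (Nat × Nat × Bool × Bool) Int :=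
  match dl with
  | [] => (acc, c)
  | d :: more =>
    let p := pvDfsAM k rest (f d) false (g d) c
    pvDfsALoop k rest f g more (acc + p.1) p.2
termination_by (rest.length + 1, dl.length)
end

def pvCalcA (k x : Int) : Int :=
  if x < 0 then 0
  else
    let digits := if x = 0 then [0] else (pvDigitsLoopA x.toNat).reverse
    (pvDfsAM k digits 0 true true ∅).1

def optimized_solver (l : Int) (r : Int) (k : Int) : Int := pvCalcA k r - pvCalcA k (l - 1)

-- ===== PORT B =====
-- step(status, d): same transition via bit tricks ('t & (t ^ (t - 1))' = lowest set bit of t)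
def pvStepB (status d : Nat) : Nat :=
  let t := (status >>> d) <<< d
  (if t ≠ 0 then status ^^^ (t &&& (t ^^^ (t - 1))) else status) ||| (1 <<< d)

-- bin(s).count('1'); exact since s is a Nat here
def pvPcB (n : Nat) : Nat :=
  if n = 0 then 0 else n % 2 + pvPcB (n / 2)
decreasing_by exact Nat.div_lt_self (Nat.pos_of_ne_zero (by assumption)) one_lt_two

-- to_digits: most-significant-first recursion
def pvDigitsB (n : Nat) : List Nat :=
  if n < 10 then [n] else pvDigitsB (n / 10) ++ [n % 10]
decreasing_by exact Nat.div_lt_self (Nat.pos_of_ne_zero (by omega)) (by norm_num)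

-- the two list comprehensions of the table build ('prev[...]' indexing is exact:
-- step s d < 1024 whenever s < 1024 and d < 10, and prev always has length 1024)
def pvNextB (prev : List Int) : List Int :=
  (List.range 1024).map (fun s => ((List.range 10).map (fun d => prev.getD (pvStepB s d) 0)).sum)

def pvNextLzB (prev : List Int) (plz : Int) : Int :=
  plz + ((List.range' 1 9).map (fun d => prev.getD (pvStepB 0 d) 0)).sum

-- 'tables = [(free, lzf)]; for _ in range(m): prev, plz = tables[-1]; tables.append(...)'
def pvTablesB (k : Int) : Nat → List (List Int × Int)
  | 0 => [((List.range 1024).map (fun s => if (pvPcB s : Int) = k then 1 else 0),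
           if k = 0 then 1 else 0)]
  | m + 1 =>
    let ts := pvTablesB k m
    let last := ts.getLastD ([], 0)
    ts ++ [(pvNextB last.1, pvNextLzB last.1 last.2)]

-- 'for dig, (free, lzf) in zip(ds, reversed(tables)):' with accumulator (total, status, lz),
-- then the final tight addition
def pvScanAltB (k : Int) : List (Nat × (List Int × Int)) → Int → Nat → Bool → Int
  | [], total, status, lz =>
    total + (if lz then (if k = 0 then 1 else 0) else (if (pvPcB status : Int) = k then 1 else 0))
  | (dig, (free, lzf)) :: rest, total, status, lz =>
    let base := if lz then 0 else status
    let total' := total + ((List.range dig).map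
      (fun d => if lz && decide (d = 0) then lzf else free.getD (pvStepB base d) 0)).sum
    if lz && decide (dig = 0) then pvScanAltB k rest total' status true
    else pvScanAltB k rest total' (pvStepB base dig) false

def pvCountAltB (k x : Int) : Int :=
  if x < 0 then 0
  else
    let ds := pvDigitsB x.toNat
    let tables := pvTablesB k (ds.length - 1)
    pvScanAltB k (ds.zip tables.reverse) 0 0 true

def optimized_solver_alt (l : Int) (r : Int) (k : Int) : Int := pvCountAltB k r - pvCountAltB k (l - 1)

-- ===== PRECONDITION & SPEC =====
def Spec_optimized_solver (l : Int) (r : Int) (k : Int) (out : Int) : Prop := out = optimized_solver_alt l r k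
instance (l : Int) (r : Int) (k : Int) (out : Int) : Decidable (Spec_optimized_solver l r k out) := by unfold Spec_optimized_solver; infer_instance

-- ===== CLAIM (what is proved, stated in full; the proofs are below) =====
def Claim_equal_optimized_solver : Prop := ∀ (l : Int) (r : Int) (k : Int), Dom_optimized_solver l r k → Spec_optimized_solver l r k (optimized_solver l r k)

-- ===== LEMMAS AND PROOFS =====

-- cache-free version of A's dfs, used only inside the proofs
def pvDfsA (k : Int) : List Nat → Nat → Bool → Bool → Int
  | [], _status, true, _ => if k = 0 then 1 else 0
  | [], status, false, _ => if (pvPcA status : Int) = k then 1 else 0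
  | dig :: rest, status, lz, limit =>
    let maxd := if limit then dig else 9
    if lz then
      pvDfsA k rest 0 true (limit && decide (0 = maxd)) +
      ((List.range' 1 maxd).map
        (fun d => pvDfsA k rest (pvTransA 0 d) false (limit && decide (d = maxd)))).sum
    else
      ((List.range (maxd + 1)).map
        (fun d => pvDfsA k rest (pvTransA status d) false (limit && decide (d = maxd)))).sum

-- mathematical completion counts (proof-side specifications of B's table entries)
def pvFreeS (k : Int) : Nat → Nat → Int
  | 0, status => if (pvPcA status : Int) = k then 1 else 0
  | m + 1, status => ((List.range 10).map (fun d => pvFreeS k m (pvTransA status d))).sum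

def pvFreeLZS (k : Int) : Nat → Int
  | 0 => if k = 0 then 1 else 0
  | m + 1 => pvFreeLZS k m + ((List.range' 1 9).map (fun d => pvFreeS k m (pvTransA 0 d))).sum

def pvScanS (k : Int) : List Nat → Int → Nat → Bool → Int
  | [], total, status, lz =>
    total + (if lz then (if k = 0 then 1 else 0) else (if (pvPcA status : Int) = k then 1 else 0))
  | dig :: rest, total, status, lz =>
    let base := if lz then 0 else status
    let total' := total + ((List.range dig).map
      (fun d => if lz && decide (d = 0) then pvFreeLZS k rest.length
                else pvFreeS k rest.length (pvTransA base d))).sum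
    if lz && decide (dig = 0) then pvScanS k rest total' status true
    else pvScanS k rest total' (pvTransA base dig) false

-- ----- A's memoized port computes the cache-free dfs -----

def pvGoodA (k : Int) (ds0 : List Nat) (c : Std.HashMap (Nat × Nat × Bool × Bool) Int) : Prop :=
  ∀ m s lz lim v, c.get? (m, s, lz, lim) = some v →
    m ≤ ds0.length ∧ v = pvDfsA k (ds0.drop (ds0.length - m)) s lz lim

theorem pv_drop_of_suffix (ds ds0 : List Nat) (h : ds <:+ ds0) :
    ds0.drop (ds0.length - ds.length) = ds := by
  obtain ⟨t, rfl⟩ := h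
  simp

theorem pvGoodA_insert (k : Int) (ds0 ds : List Nat) (h : ds <:+ ds0)
    (c : Std.HashMap (Nat × Nat × Bool × Bool) Int) (hc : pvGoodA k ds0 c)
    (s : Nat) (lz lim : Bool) :
    pvGoodA k ds0 (c.insert (ds.length, s, lz, lim) (pvDfsA k ds s lz lim)) := by
  intro m s' lz' lim' v hv
  simp only [Std.HashMap.get?_eq_getElem?, Std.HashMap.getElem?_insert] at hv
  split at hv
  · rename_i heq
    have h1 : ((ds.length, s, lz, lim) : Nat × Nat × Bool × Bool) = (m, s', lz', lim') := by
      simpa using heq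
    cases h1
    injection hv with hv
    refine ⟨List.IsSuffix.length_le h, ?_⟩
    rw [pv_drop_of_suffix ds ds0 h]
    exact hv.symm
  · exact hc m s' lz' lim' v (by simpa [Std.HashMap.get?_eq_getElem?] using hv)

theorem pvDfsALoop_spec (k : Int) (ds0 rest : List Nat) (f : Nat → Nat) (g : Nat → Bool)
    (IH : ∀ (s : Nat) (lz lim : Bool) c, pvGoodA k ds0 c →
      (pvDfsAM k rest s lz lim c).1 = pvDfsA k rest s lz lim ∧
      pvGoodA k ds0 (pvDfsAM k rest s lz lim c).2) :
    ∀ (dl : List Nat) (acc : Int) c, pvGoodA k ds0 c →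
      (pvDfsALoop k rest f g dl acc c).1 =
        acc + ((dl.map (fun d => pvDfsA k rest (f d) false (g d))).sum) ∧
      pvGoodA k ds0 (pvDfsALoop k rest f g dl acc c).2 := by
  intro dl
  induction dl with
  | nil => intro acc c hc; simp [pvDfsALoop, hc]
  | cons d more ih =>
    intro acc c hc
    rw [pvDfsALoop]
    obtain ⟨hv, hc'⟩ := IH (f d) false (g d) c hc
    obtain ⟨hl, hc''⟩ := ih (acc + (pvDfsAM k rest (f d) false (g d) c).1)
      (pvDfsAM k rest (f d) false (g d) c).2 hc'
    refine ⟨?_, hc''⟩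
    rw [hl, hv]
    simp
    ring

theorem pvDfsAM_spec (k : Int) (ds0 : List Nat) :
    ∀ (ds : List Nat), ds <:+ ds0 → ∀ (s : Nat) (lz lim : Bool) c, pvGoodA k ds0 c →
      (pvDfsAM k ds s lz lim c).1 = pvDfsA k ds s lz lim ∧
      pvGoodA k ds0 (pvDfsAM k ds s lz lim c).2 := by
  intro ds
  induction ds with
  | nil =>
    intro hsuf s lz lim c hc
    rw [pvDfsAM]
    cases hget : c.get? (List.length ([] : List Nat), s, lz, lim) with
    | some v =>
      obtain ⟨_, hval⟩ := hc _ s lz lim v hget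
      rw [pv_drop_of_suffix _ _ hsuf] at hval
      dsimp only
      exact ⟨hval, hc⟩
    | none =>
      dsimp only
      constructor
      · cases lz <;> simp [pvDfsA]
      · have h2 := pvGoodA_insert k ds0 [] List.nil_suffix c hc s lz lim
        convert h2 using 2
        cases lz <;> simp [pvDfsA]
  | cons dig rest ih =>
    intro hsuf s lz lim c hc
    have hrs : rest <:+ ds0 := List.IsSuffix.trans (List.suffix_cons dig rest) hsuf
    have IH := fun s' lz' lim' c' hc' => ih hrs s' lz' lim' c' hc'
    rw [pvDfsAM]
    cases hget : c.get? (List.length (dig :: rest), s, lz, lim) with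
    | some v =>
      obtain ⟨_, hval⟩ := hc _ s lz lim v hget
      rw [pv_drop_of_suffix _ _ hsuf] at hval
      dsimp only
      exact ⟨hval, hc⟩
    | none =>
      dsimp only
      cases lz with
      | true =>
        simp only [if_true]
        obtain ⟨hv0, hc0⟩ :=
          IH 0 true (lim && decide (0 = if lim then dig else 9)) c hc
        obtain ⟨hv1, hc1⟩ := pvDfsALoop_spec k ds0 rest (fun d => pvTransA 0 d)
          (fun d => lim && decide (d = if lim then dig else 9)) IH
          (List.range' 1 (if lim then dig else 9)) _ _ hc0
        constructor
        · rw [hv1, hv0, pvDfsA]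
          simp
        · have h2 := pvGoodA_insert k ds0 (dig :: rest) hsuf _ hc1 s true lim
          convert h2 using 2
          rw [hv1, hv0, pvDfsA]
          simp
      | false =>
        simp only [Bool.false_eq_true, if_false]
        obtain ⟨hv1, hc1⟩ := pvDfsALoop_spec k ds0 rest (fun d => pvTransA s d)
          (fun d => lim && decide (d = if lim then dig else 9)) IH
          (List.range ((if lim then dig else 9) + 1)) 0 c hc
        constructor
        · rw [hv1, pvDfsA]
          simp
        · have h2 := pvGoodA_insert k ds0 (dig :: rest) hsuf _ hc1 s false lim
          convert h2 using 2
          rw [hv1, pvDfsA]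
          simp

theorem pvDfsAM_eval (k : Int) (ds : List Nat) :
    (pvDfsAM k ds 0 true true ∅).1 = pvDfsA k ds 0 true true := by
  have hc : pvGoodA k ds (∅ : Std.HashMap (Nat × Nat × Bool × Bool) Int) := by
    intro m s lz lim v hv
    simp at hv
  exact (pvDfsAM_spec k ds ds (List.suffix_refl ds) 0 true true ∅ hc).1

-- ----- B's tables and scan compute the mathematical completion counts -----

set_option maxRecDepth 100000
set_option maxHeartbeats 2000000

theorem pvStep_eq : ∀ s < 1024, ∀ d < 10, pvStepB s d = pvTransA s d ∧ pvStepB s d < 1024 := by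
  decide

theorem pvPc_eq (n : Nat) : pvPcB n = pvPcA n := by
  induction n using Nat.strong_induction_on with
  | _ n ih =>
    rw [pvPcA, pvPcB]
    by_cases h : n = 0
    · simp [h]
    · rw [ih (n / 2) (Nat.div_lt_self (Nat.pos_of_ne_zero h) one_lt_two)]

theorem pv_getD_range_map (f : Nat → Int) (n i : Nat) (h : i < n) :
    ((List.range n).map f).getD i 0 = f i := by
  rw [List.getD_eq_getElem?_getD, List.getElem?_map, List.getElem?_range h]
  rfl

def pvLevelL (k : Int) (j : Nat) : List Int := (List.range 1024).map (fun s => pvFreeS k j s)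
def pvLevelP (k : Int) (j : Nat) : List Int × Int := (pvLevelL k j, pvFreeLZS k j)

theorem pvLevelL_getD (k : Int) (j s : Nat) (hs : s < 1024) :
    (pvLevelL k j).getD s 0 = pvFreeS k j s :=
  pv_getD_range_map _ 1024 s hs

theorem pvNextB_level (k : Int) (j : Nat) : pvNextB (pvLevelL k j) = pvLevelL k (j + 1) := by
  unfold pvNextB pvLevelL
  refine List.map_congr_left ?_
  intro s hs
  rw [List.mem_range] at hs
  rw [pvFreeS]
  refine congrArg List.sum (List.map_congr_left ?_)
  intro d hd
  rw [List.mem_range] at hd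
  obtain ⟨he, hlt⟩ := pvStep_eq s hs d hd
  rw [show ((List.range 1024).map fun s => pvFreeS k j s) = pvLevelL k j from rfl,
      pvLevelL_getD k j _ hlt, he]

theorem pvNextLzB_level (k : Int) (j : Nat) :
    pvNextLzB (pvLevelL k j) (pvFreeLZS k j) = pvFreeLZS k (j + 1) := by
  unfold pvNextLzB
  rw [pvFreeLZS]
  refine congrArg (pvFreeLZS k j + ·) (congrArg List.sum (List.map_congr_left ?_))
  intro d hd
  rw [List.mem_range'_1] at hd
  obtain ⟨he, hlt⟩ := pvStep_eq 0 (by norm_num) d (by omega)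
  rw [pvLevelL_getD k j _ hlt, he]

theorem pvTablesB_eq (k : Int) (m : Nat) :
    pvTablesB k m = (List.range (m + 1)).map (pvLevelP k) := by
  induction m with
  | zero =>
    rw [pvTablesB]
    simp [pvLevelP, pvLevelL, pvFreeS, pvFreeLZS, pvPc_eq]
  | succ m ih =>
    rw [pvTablesB, ih]
    have hlast : (((List.range (m + 1)).map (pvLevelP k)).getLastD ([], 0)) = pvLevelP k m := by
      rw [List.range_succ, List.map_append]
      simp
    rw [hlast, List.range_succ (n := m + 1), List.map_append]
    simp [pvLevelP, pvNextB_level, pvNextLzB_level]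

theorem pv_rev_range_map_succ (f : Nat → List Int × Int) (n : Nat) :
    ((List.range (n + 1)).map f).reverse = f n :: ((List.range n).map f).reverse := by
  rw [List.range_succ, List.map_append]
  simp

theorem pvScanAltB_spec (k : Int) :
    ∀ (ds : List Nat), (∀ d ∈ ds, d < 10) →
      ∀ (total : Int) (status : Nat), status < 1024 → ∀ (lz : Bool),
      pvScanAltB k (ds.zip (((List.range ds.length).map (pvLevelP k)).reverse)) total status lz =
        pvScanS k ds total status lz := by
  intro ds
  induction ds with
  | nil => intro _ total status _ lz; simp [pvScanAltB, pvScanS, pvPc_eq]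
  | cons dig rest ih =>
    intro hds total status hst lz
    have hdig : dig < 10 := hds dig (List.mem_cons_self ..)
    have hrest : ∀ d ∈ rest, d < 10 := fun d hd => hds d (List.mem_cons_of_mem _ hd)
    rw [List.length_cons, pv_rev_range_map_succ, List.zip_cons_cons]
    rw [pvScanAltB, pvScanS]
    have hbase : (if lz = true then 0 else status) < 1024 := by
      split <;> [norm_num; exact hst]
    have hsum : ((List.range dig).map
        (fun d => if lz && decide (d = 0) then (pvLevelP k rest.length).2
                  else (pvLevelP k rest.length).1.getD (pvStepB (if lz = true then 0 else status) d) 0)).sum =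
        ((List.range dig).map
        (fun d => if lz && decide (d = 0) then pvFreeLZS k rest.length
                  else pvFreeS k rest.length (pvTransA (if lz = true then 0 else status) d))).sum := by
      refine congrArg List.sum (List.map_congr_left ?_)
      intro d hd
      rw [List.mem_range] at hd
      by_cases hl : (lz && decide (d = 0)) = true
      · rw [if_pos hl, if_pos hl]; rfl
      · rw [if_neg hl, if_neg hl]
        obtain ⟨he, hlt⟩ := pvStep_eq _ hbase d (by omega)
        simp only [pvLevelP]
        rw [he, pvLevelL_getD k rest.length _ (he ▸ hlt)]
    by_cases h0 : (lz && decide (dig = 0)) = true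
    · rw [if_pos h0, if_pos h0, hsum, ih hrest _ status hst true]
    · rw [if_neg h0, if_neg h0, hsum,
          (pvStep_eq _ hbase dig hdig).1,
          ih hrest _ _ ((pvStep_eq _ hbase dig hdig).1 ▸ (pvStep_eq _ hbase dig hdig).2) false]

-- ----- cache-free A = the proof-side scan -----

theorem pvFree_spec (k : Int) (ds : List Nat) (status : Nat) :
    pvDfsA k ds status false false = pvFreeS k ds.length status := by
  induction ds generalizing status with
  | nil => simp [pvDfsA, pvFreeS]
  | cons dig rest ih => simp [pvDfsA, pvFreeS, ih]

theorem pvFreeLZ_spec (k : Int) (ds : List Nat) (status : Nat) :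
    pvDfsA k ds status true false = pvFreeLZS k ds.length := by
  induction ds generalizing status with
  | nil => simp [pvDfsA, pvFreeLZS]
  | cons dig rest ih => simp [pvDfsA, pvFreeLZS, ih, pvFree_spec]

theorem pvDfsA_lz_irrel (k : Int) (ds : List Nat) (s s' : Nat) (lim : Bool) :
    pvDfsA k ds s true lim = pvDfsA k ds s' true lim := by
  cases ds <;> simp [pvDfsA]

theorem pvScanS_spec (k : Int) (ds : List Nat) (total : Int) (status : Nat) (lz : Bool) :
    pvScanS k ds total status lz = total + pvDfsA k ds status lz true := by
  induction ds generalizing total status lz with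
  | nil => cases lz <;> simp [pvScanS, pvDfsA]
  | cons dig rest ih =>
    cases lz with
    | false =>
      rw [pvScanS, pvDfsA]
      simp only [Bool.false_and, Bool.true_and, ih, Bool.false_eq_true, if_false, if_true]
      have hmap : ∀ d ∈ List.range dig,
          pvDfsA k rest (pvTransA status d) false (decide (d = dig)) =
            pvFreeS k rest.length (pvTransA status d) := by
        intro d hd
        rw [List.mem_range] at hd
        rw [decide_eq_false (by omega), pvFree_spec]
      rw [List.range_succ, List.map_append, List.sum_append, List.map_congr_left hmap]
      simp
      ring
    | true =>
      rcases Nat.eq_zero_or_pos dig with h0 | hpos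
      · subst h0
        rw [pvScanS, pvDfsA]
        simp [ih, pvDfsA_lz_irrel k rest status 0]
      · obtain ⟨m, rfl⟩ : ∃ m, dig = m + 1 := ⟨dig - 1, by omega⟩
        rw [pvScanS, pvDfsA]
        simp only [Bool.true_and, ih, if_false, if_true, Nat.succ_ne_zero, decide_eq_true_eq]
        have h1 : List.range (m + 1) = 0 :: List.range' 1 m := by
          rw [List.range_eq_range', List.range'_succ]
        have h2 : List.range' 1 (m + 1) = List.range' 1 m ++ [m + 1] := by
          simpa [Nat.add_comm] using List.range'_concat (s := 1) (n := m) (step := 1)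
        have hmapL : ∀ d ∈ List.range' 1 m,
            (if d = 0 then pvFreeLZS k rest.length else pvFreeS k rest.length (pvTransA 0 d)) =
              pvFreeS k rest.length (pvTransA 0 d) := by
          intro d hd
          rw [List.mem_range'_1] at hd
          rw [if_neg (by omega)]
        have hmapR : ∀ d ∈ List.range' 1 m,
            pvDfsA k rest (pvTransA 0 d) false (decide (d = m + 1)) =
              pvFreeS k rest.length (pvTransA 0 d) := by
          intro d hd
          rw [List.mem_range'_1] at hd
          rw [decide_eq_false (by omega), pvFree_spec]
        have hlz : pvDfsA k rest 0 true (decide (0 = m + 1)) = pvFreeLZS k rest.length := by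
          rw [decide_eq_false (by omega), pvFreeLZ_spec]
        rw [h1, h2, List.map_append, List.sum_append, List.map_cons, List.sum_cons,
            List.map_congr_left hmapL, List.map_congr_left hmapR, hlz]
        simp
        ring

-- ----- digits -----

theorem pvDigits_eq (n : Nat) (h : n ≠ 0) : (pvDigitsLoopA n).reverse = pvDigitsB n := by
  induction n using Nat.strong_induction_on with
  | _ n ih =>
    rw [pvDigitsLoopA, pvDigitsB, if_neg h]
    by_cases h10 : n < 10
    · simp [Nat.div_eq_of_lt h10, pvDigitsLoopA, Nat.mod_eq_of_lt h10, h10]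
    · rw [if_neg h10, ← ih (n / 10) (Nat.div_lt_self (Nat.pos_of_ne_zero h) (by norm_num)) (by omega)]
      simp

theorem pvDigitsB_lt10 (n : Nat) : ∀ d ∈ pvDigitsB n, d < 10 := by
  induction n using Nat.strong_induction_on with
  | _ n ih =>
    rw [pvDigitsB]
    by_cases h10 : n < 10
    · simp [h10]
    · rw [if_neg h10]
      intro d hd
      rcases List.mem_append.1 hd with h | h
      · exact ih (n / 10) (Nat.div_lt_self (by omega) (by norm_num)) d h
      · simp at h; omega

theorem pvDigitsB_ne_nil (n : Nat) : pvDigitsB n ≠ [] := by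
  rw [pvDigitsB]
  split <;> simp

-- ----- the two counters agree -----

theorem pvCalc_eq (k x : Int) : pvCalcA k x = pvCountAltB k x := by
  unfold pvCalcA pvCountAltB
  by_cases hx : x < 0
  · simp [hx]
  · rw [if_neg hx, if_neg hx, pvDfsAM_eval]
    have hds : (if x = 0 then [0] else (pvDigitsLoopA x.toNat).reverse) = pvDigitsB x.toNat := by
      by_cases h0 : x = 0
      · subst h0; simp [pvDigitsB]
      · rw [if_neg h0, pvDigits_eq x.toNat (by omega)]
    rw [hds]
    show pvDfsA k (pvDigitsB x.toNat) 0 true true =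
      pvScanAltB k ((pvDigitsB x.toNat).zip
        ((pvTablesB k ((pvDigitsB x.toNat).length - 1)).reverse)) 0 0 true
    have hlen : 1 ≤ (pvDigitsB x.toNat).length := by
      have := pvDigitsB_ne_nil x.toNat
      cases h : pvDigitsB x.toNat with
      | nil => exact absurd h this
      | cons a t => simp
    rw [pvTablesB_eq, Nat.sub_add_cancel hlen,
        pvScanAltB_spec k _ (pvDigitsB_lt10 x.toNat) 0 0 (by norm_num) true,
        pvScanS_spec, zero_add]

-- ===== VERDICT (by name: the statement is the Claim_ definition above) =====
theorem optimized_solver_spec : Claim_equal_optimized_solver := by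
  intro l r k _
  unfold Spec_optimized_solver optimized_solver optimized_solver_alt
  rw [pvCalc_eq, pvCalc_eq]
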